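-- pv_equiv track=rewrite | github.com/kimyoungjin06/aoe_orch_control | scripts/gateway/aoe_tg_investigations_sync.py | _pick_active_request_id
-- ===== SOURCE A (Python) =====
-- from typing import Any, Dict, Iterable, List, Optional, Tuple
--
-- def _normalize_status(raw: Any) -> str:
--     token = str(raw or "").strip().lower()
--     if token in {"pending", "running", "completed", "failed"}:
--         return token
--     aliases = {
--         "done": "completed",
--         "complete": "completed",
--         "success": "completed",
--         "error": "failed",
--         "active": "running",
--         "in_progress": "running",
--     }
--     return aliases.get(token, "pending")
--
-- def _sorted_tasks(tasks: Dict[str, Any]) -> List[Tuple[str, Dict[str, Any]]]: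
--     rows: List[Tuple[str, Dict[str, Any]]] = []
--     for req_id, task in (tasks or {}).items():
--         if not isinstance(task, dict):
--             continue
--         rid = str(req_id or "").strip()
--         if not rid:
--             continue
--         rows.append((rid, task))
--     rows.sort(
--         key=lambda kv: (
--             str((kv[1] or {}).get("updated_at", "")),
--             str((kv[1] or {}).get("created_at", "")),
--         ),
--         reverse=True,
--     )
--     return rows
--
-- def _pick_active_request_id(entry: Dict[str, Any], tasks: Dict[str, Any]) -> str:
--     last_req = str(entry.get("last_request_id", "")).strip()
--     if last_req and last_req in tasks:
--         return last_req
--     rows = _sorted_tasks(tasks)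
--     for req_id, task in rows:
--         if _normalize_status(task.get("status")) in {"running", "pending"}:
--             return req_id
--     return rows[0][0] if rows else ""
-- ===== SOURCE B (Python) =====
-- def _normalize_status(raw):
--     token = str(raw or "").strip().lower()
--     if token in {"pending", "running", "completed", "failed"}:
--         return token
--     aliases = {
--         "done": "completed",
--         "complete": "completed",
--         "success": "completed",
--         "error": "failed",
--         "active": "running",
--         "in_progress": "running",
--     }
--     return aliases.get(token, "pending")
--
--
-- def _pick_active_request_id(entry, tasks):
--     # Single pass with two running maxima instead of A's sort-then-scan.
--     last_req = str(entry.get("last_request_id", "")).strip()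
--     if last_req and last_req in tasks:
--         return last_req
--     best_any = None     # (key, rid) with the largest key, earliest wins ties
--     best_active = None  # same, among running/pending tasks
--     for req_id, task in tasks.items():
--         rid = str(req_id).strip()
--         if not rid:
--             continue
--         key = (str(task.get("updated_at", "")), str(task.get("created_at", "")))
--         if best_any is None or key > best_any[0]:
--             best_any = (key, rid)
--         if _normalize_status(task.get("status")) in ("running", "pending"):
--             if best_active is None or key > best_active[0]:
--                 best_active = (key, rid)
--     if best_active is not None:
--         return best_active[1]
--     return best_any[1] if best_any is not None else ""
-- ===== Notes on version B (the rewrite author's own statement) =====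
-- stated objective: alternative
-- what changed: A builds the filtered row list, sorts it by (updated_at, created_at) descending and scans it twice (first running/pending row, else first row); B makes one pass over the tasks keeping two running maxima (best running/pending row and best overall row under the lexicographic key, earliest entry winning ties), with no sort.
import Mathlib
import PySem

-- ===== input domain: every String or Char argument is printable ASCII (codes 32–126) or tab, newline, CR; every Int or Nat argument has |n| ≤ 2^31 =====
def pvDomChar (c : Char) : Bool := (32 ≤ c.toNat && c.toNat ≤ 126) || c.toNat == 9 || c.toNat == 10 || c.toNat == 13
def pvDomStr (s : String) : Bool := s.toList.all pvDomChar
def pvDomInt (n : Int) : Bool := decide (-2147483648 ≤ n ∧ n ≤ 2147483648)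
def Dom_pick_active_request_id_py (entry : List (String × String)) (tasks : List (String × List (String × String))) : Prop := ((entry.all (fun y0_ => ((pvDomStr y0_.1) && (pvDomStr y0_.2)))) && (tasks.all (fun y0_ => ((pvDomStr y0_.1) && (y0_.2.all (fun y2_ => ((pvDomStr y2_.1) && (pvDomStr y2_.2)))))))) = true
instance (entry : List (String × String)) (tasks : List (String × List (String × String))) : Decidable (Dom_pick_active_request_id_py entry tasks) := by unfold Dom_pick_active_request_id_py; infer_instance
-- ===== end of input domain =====

-- B replaces A's sort-then-scan by a single pass that keeps two running maxima (best
-- running/pending row and best overall row); return values agree on every input (both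
-- Pythons are total on the typed domain).

-- ===== PORT A =====
-- _normalize_status(raw): raw enters as str(raw or "") — the port receives the string already,
-- missing/None values are passed as "" (str(None or "") == "" == str("" or "")).
def pvNormStatus (raw : String) : String :=
  let token := PySem.Str.lower (PySem.Str.strip raw)
  if token = "pending" ∨ token = "running" ∨ token = "completed" ∨ token = "failed" then token
  else -- aliases.get(token, "pending")
    if token = "done" then "completed"
    else if token = "complete" then "completed"
    else if token = "success" then "completed"
    else if token = "error" then "failed"
    else if token = "active" then "running"
    else if token = "in_progress" then "running"
    else "pending"

-- str((task or {}).get(k, "")) / str(task.get(k) or "") for a str-valued task dict: both give "" when absent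
def pvTaskGet (task : List (String × String)) (k : String) : String :=
  (PySem.Dict.ofList task).getD k ""

-- _sorted_tasks: the row-building loop (isinstance(task, dict) is always true on the typed domain)
def pvRowsA (td : PySem.Dict String (List (String × String))) : List (String × List (String × String)) :=
  td.items.foldl (fun rows kv =>
    let rid := PySem.Str.strip kv.1
    if rid = "" then rows else rows ++ [(rid, kv.2)]) []

-- rows.sort(key=..., reverse=True)
def pvSortedTasksA (td : PySem.Dict String (List (String × String))) : List (String × List (String × String)) :=
  PySem.List.sorted2 (pvRowsA td) (fun kv => pvTaskGet kv.2 "updated_at") (fun kv => pvTaskGet kv.2 "created_at") true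

-- _normalize_status(task.get("status")) in {"running", "pending"}
def pvIsActive (task : List (String × String)) : Bool :=
  let s := pvNormStatus (pvTaskGet task "status")
  s == "running" || s == "pending"

-- the part of A after the early return (helper decomposition of the same code)
def pvAfterA (td : PySem.Dict String (List (String × String))) : String :=
  match (pvSortedTasksA td).find? (fun kv => pvIsActive kv.2) with
  | some kv => kv.1
  | none => match pvSortedTasksA td with   -- rows[0][0] if rows else ""
            | [] => ""
            | kv :: _ => kv.1

def pick_active_request_id_py (entry : List (String × String)) (tasks : List (String × List (String × String))) : String :=
  let lastReq := PySem.Str.strip ((PySem.Dict.ofList entry).getD "last_request_id" "")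
  let td := PySem.Dict.ofList tasks
  if lastReq ≠ "" ∧ td.contains lastReq = true then lastReq
  else pvAfterA td

-- ===== PORT B =====
-- loop state: (best_any, best_active), each Option (key, rid); 'key > best[0]' is Python's
-- lexicographic tuple comparison, written out componentwise (Lean's Prod '<' is not lexicographic)
def pvLoopB (td : PySem.Dict String (List (String × String))) :
    Option ((String × String) × String) × Option ((String × String) × String) :=
  td.items.foldl (fun st kv =>
    let rid := PySem.Str.strip kv.1
    if rid = "" then st
    else
      let key := (pvTaskGet kv.2 "updated_at", pvTaskGet kv.2 "created_at")
      let gt := fun (b : (String × String) × String) =>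
        b.1.1 < key.1 ∨ (b.1.1 = key.1 ∧ b.1.2 < key.2)
      let bAny := match st.1 with
        | none => some (key, rid)
        | some b => if gt b then some (key, rid) else st.1
      let bAct := if pvIsActive kv.2 then
          match st.2 with
          | none => some (key, rid)
          | some b => if gt b then some (key, rid) else st.2
        else st.2
      (bAny, bAct)) (none, none)

def pvAfterB (td : PySem.Dict String (List (String × String))) : String :=
  match (pvLoopB td).2 with
  | some b => b.2
  | none => match (pvLoopB td).1 with
            | some b => b.2
            | none => ""

def pick_active_request_id_py_alt (entry : List (String × String)) (tasks : List (String × List (String × String))) : String :=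
  let lastReq := PySem.Str.strip ((PySem.Dict.ofList entry).getD "last_request_id" "")
  let td := PySem.Dict.ofList tasks
  if lastReq ≠ "" ∧ td.contains lastReq = true then lastReq
  else pvAfterB td

-- ===== PRECONDITION & SPEC =====
def Spec_pick_active_request_id_py (entry : List (String × String)) (tasks : List (String × List (String × String))) (out : String) : Prop := out = pick_active_request_id_py_alt entry tasks
instance (entry : List (String × String)) (tasks : List (String × List (String × String))) (out : String) : Decidable (Spec_pick_active_request_id_py entry tasks out) := by unfold Spec_pick_active_request_id_py; infer_instance

-- ===== CLAIM (what is proved, stated in full; the proofs are below) =====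
def Claim_equal_pick_active_request_id_py : Prop := ∀ (entry : List (String × String)) (tasks : List (String × List (String × String))), Dom_pick_active_request_id_py entry tasks → Spec_pick_active_request_id_py entry tasks (pick_active_request_id_py entry tasks)

-- ===== LEMMAS AND PROOFS =====

-- the strict (lexicographic) comparison of the sort keys, as a Bool
def pvLtB {α : Type} (k1 k2 : α → String) (a b : α) : Bool :=
  decide (k1 a < k1 b) || (decide (k1 a = k1 b) && decide (k2 a < k2 b))

-- one step of B's running-maximum loop, on raw rows (p selects the rows the maximum is over)
def pvStep {α : Type} (k1 k2 : α → String) (p : α → Bool) (o : Option α) (x : α) : Option α :=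
  if p x then some (match o with
                    | none => x
                    | some b => if pvLtB k1 k2 b x then x else b)
  else o

-- sorted2's internal comparison equals pvLtB
theorem pvLtB_eq_sorted2_lt {α : Type} (k1 k2 : α → String) :
    (fun a b => (decide (k1 a < k1 b) || (!decide (k1 b < k1 a) && decide (k2 a < k2 b)))) =
      pvLtB k1 k2 := by
  funext a b
  rcases lt_trichotomy (k1 a) (k1 b) with h | h | h
  · simp [pvLtB, h]
  · simp [pvLtB, h, lt_irrefl]
  · have h1 : ¬ k1 a < k1 b := lt_asymm h
    have h2 : k1 a ≠ k1 b := ne_of_gt h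
    simp [pvLtB, h, h1, h2]
theorem pvLtB_asymm {α : Type} (k1 k2 : α → String) {a b : α}
    (h : pvLtB k1 k2 a b = true) : pvLtB k1 k2 b a = false := by
  simp only [pvLtB, Bool.or_eq_true_iff, Bool.and_eq_true_iff, decide_eq_true_iff] at h
  simp only [pvLtB, Bool.or_eq_false_iff, Bool.and_eq_false_iff, decide_eq_false_iff_not]
  rcases h with h | ⟨h1, h2⟩
  · exact ⟨lt_asymm h, Or.inl (ne_of_gt h)⟩
  · exact ⟨fun hh => absurd h1 (ne_of_gt hh), Or.inr (lt_asymm h2)⟩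
theorem pvLtB_trans_not {α : Type} (k1 k2 : α → String) {x y b : α}
    (h1 : pvLtB k1 k2 y x = true) (h2 : pvLtB k1 k2 y b = false) : pvLtB k1 k2 b x = true := by
  simp only [pvLtB, Bool.or_eq_true_iff, Bool.and_eq_true_iff, decide_eq_true_iff] at h1 ⊢
  simp only [pvLtB, Bool.or_eq_false_iff, Bool.and_eq_false_iff, decide_eq_false_iff_not] at h2
  obtain ⟨hb1, hb2⟩ := h2
  have hble : k1 b ≤ k1 y := le_of_not_gt hb1
  rcases h1 with h | ⟨h1, h2⟩
  · exact Or.inl (lt_of_le_of_lt hble h)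
  · rcases lt_or_eq_of_le hble with hlt | heq
    · exact Or.inl (lt_of_lt_of_le hlt (le_of_eq h1))
    · refine Or.inr ⟨heq.trans h1, ?_⟩
      rcases hb2 with hne | hnlt
      · exact absurd heq.symm hne
      · exact lt_of_le_of_lt (le_of_not_gt hnlt) h2

-- insertion keeps the list sorted in descending order
theorem pairwise_insertBy {α : Type} (k1 k2 : α → String) (x : α) (acc : List α)
    (h : acc.Pairwise (fun a b => pvLtB k1 k2 a b = false)) :
    (PySem.List.insertBy (fun a b => pvLtB k1 k2 b a) x acc).Pairwise
      (fun a b => pvLtB k1 k2 a b = false) := by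
  induction acc with
  | nil => simp [PySem.List.insertBy]
  | cons y ys ih =>
    rw [List.pairwise_cons] at h
    obtain ⟨hy, hys⟩ := h
    by_cases hc : pvLtB k1 k2 y x = true
    · simp only [PySem.List.insertBy, hc, if_pos]
      refine List.Pairwise.cons ?_ (List.Pairwise.cons hy hys)
      intro b hb
      rcases List.mem_cons.mp hb with rfl | hb
      · exact pvLtB_asymm k1 k2 hc
      · exact pvLtB_asymm k1 k2 (pvLtB_trans_not k1 k2 hc (hy b hb))
    · rw [Bool.not_eq_true] at hc
      simp only [PySem.List.insertBy, hc, Bool.false_eq_true, if_neg, not_false_iff]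
      refine List.Pairwise.cons ?_ (ih hys)
      intro b hb
      rcases (PySem.List.mem_insertBy _ x b ys).mp hb with rfl | hb
      · exact hc
      · exact hy b hb

-- find? after one insertion = one pvStep
theorem find?_insertBy {α : Type} (k1 k2 : α → String) (p : α → Bool) (x : α) (acc : List α)
    (h : acc.Pairwise (fun a b => pvLtB k1 k2 a b = false)) :
    (PySem.List.insertBy (fun a b => pvLtB k1 k2 b a) x acc).find? p =
      pvStep k1 k2 p (acc.find? p) x := by
  induction acc with
  | nil =>
    simp only [PySem.List.insertBy, List.find?_nil, pvStep]
    by_cases hp : p x = true <;> simp [List.find?, hp]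
  | cons y ys ih =>
    rw [List.pairwise_cons] at h
    obtain ⟨hy, hys⟩ := h
    by_cases hc : pvLtB k1 k2 y x = true
    · simp only [PySem.List.insertBy, hc, if_pos]
      by_cases hp : p x = true
      · cases hfind : List.find? p (y :: ys) with
        | none => simp [pvStep, List.find?_cons, hp]
        | some b =>
          have hb : b ∈ y :: ys := List.mem_of_find?_eq_some hfind
          have hbx : pvLtB k1 k2 b x = true := by
            rcases List.mem_cons.mp hb with rfl | hb
            · exact hc
            · exact pvLtB_trans_not k1 k2 hc (hy b hb)
          simp [pvStep, List.find?_cons, hp, hbx]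
      · rw [Bool.not_eq_true] at hp
        simp [List.find?_cons, hp, pvStep]
    · rw [Bool.not_eq_true] at hc
      simp only [PySem.List.insertBy, hc, Bool.false_eq_true, if_neg, not_false_iff]
      by_cases hpy : p y = true
      · simp only [List.find?_cons, hpy, pvStep]
        by_cases hp : p x = true <;> simp [hp, hc]
      · rw [Bool.not_eq_true] at hpy
        simp only [List.find?_cons, hpy]
        exact ih hys

-- find? over the whole insertion sort = B's running-maximum fold
theorem find?_foldl_insertBy {α : Type} (k1 k2 : α → String) (p : α → Bool) (l : List α) :
    ∀ (acc : List α), acc.Pairwise (fun a b => pvLtB k1 k2 a b = false) →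
    (l.foldl (fun acc x => PySem.List.insertBy (fun a b => pvLtB k1 k2 b a) x acc) acc).find? p =
      l.foldl (pvStep k1 k2 p) (acc.find? p) := by
  induction l with
  | nil => intro acc _; simp
  | cons x xs ih =>
    intro acc hacc
    simp only [List.foldl_cons]
    rw [ih _ (pairwise_insertBy k1 k2 x acc hacc), find?_insertBy k1 k2 p x acc hacc]

theorem find?_sorted2 {α : Type} (k1 k2 : α → String) (p : α → Bool) (l : List α) :
    (PySem.List.sorted2 l k1 k2 true).find? p = l.foldl (pvStep k1 k2 p) none := by
  have h : PySem.List.sorted2 l k1 k2 true =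
      l.foldl (fun acc x => PySem.List.insertBy (fun a b => pvLtB k1 k2 b a) x acc) [] := by
    have hfun : (fun a b => decide (k1 b < k1 a) || (!decide (k1 a < k1 b) && decide (k2 b < k2 a))) = (fun a b : α => pvLtB k1 k2 b a) := by
      funext a b
      exact congrFun (congrFun (pvLtB_eq_sorted2_lt k1 k2) b) a
    simp only [PySem.List.sorted2, if_true]
    rw [hfun]
  rw [h, find?_foldl_insertBy k1 k2 p l [] (List.Pairwise.nil)]
  simp

theorem find?_true_eq_head? {α : Type} (l : List α) :
    l.find? (fun _ => true) = l.head? := by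
  cases l <;> simp [List.find?_cons]

-- abbreviations for the concrete keys / row type
def pvK1 (kv : String × List (String × String)) : String := pvTaskGet kv.2 "updated_at"
def pvK2 (kv : String × List (String × String)) : String := pvTaskGet kv.2 "created_at"
def pvPi (kv : String × List (String × String)) : (String × String) × String :=
  ((pvK1 kv, pvK2 kv), kv.1)

theorem pvLtB_iff {α : Type} (k1 k2 : α → String) (a b : α) :
    pvLtB k1 k2 a b = true ↔ (k1 a < k1 b ∨ (k1 a = k1 b ∧ k2 a < k2 b)) := by
  simp [pvLtB]

-- B's per-accumulator step on (key, rid), and the filtered row view of the loops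
def pvAnyStep (o : Option ((String × String) × String)) (r : String × List (String × String)) :
    Option ((String × String) × String) :=
  match o with
  | none => some (pvPi r)
  | some b => if b.1.1 < pvK1 r ∨ (b.1.1 = pvK1 r ∧ b.1.2 < pvK2 r) then some (pvPi r) else o

def pvActStep (o : Option ((String × String) × String)) (r : String × List (String × String)) :
    Option ((String × String) × String) :=
  if pvIsActive r.2 then pvAnyStep o r else o

def pvBodyRow (st : Option ((String × String) × String) × Option ((String × String) × String))
    (r : String × List (String × String)) :
    Option ((String × String) × String) × Option ((String × String) × String) :=
  (pvAnyStep st.1 r, pvActStep st.2 r)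

def pvG0 (kv : String × List (String × String)) : Option (String × List (String × String)) :=
  if PySem.Str.strip kv.1 = "" then none else some (PySem.Str.strip kv.1, kv.2)

theorem pvRowsA_eq (td : PySem.Dict String (List (String × String))) :
    pvRowsA td = td.items.filterMap pvG0 := by
  unfold pvRowsA
  suffices h : ∀ (l : List (String × List (String × String)))
      (acc : List (String × List (String × String))),
      l.foldl (fun rows kv =>
        let rid := PySem.Str.strip kv.1
        if rid = "" then rows else rows ++ [(rid, kv.2)]) acc = acc ++ l.filterMap pvG0 by
    simpa using h td.items []
  intro l
  induction l with
  | nil => simp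
  | cons kv l ih =>
    intro acc
    by_cases h : PySem.Str.strip kv.1 = "" <;> simp [pvG0, h, ih]

-- B's per-row step is pvStep seen through the projection pvPi
theorem anyStep_map_pi (p : (String × List (String × String)) → Bool)
    (o : Option (String × List (String × String))) (kv : String × List (String × String)) :
    (if p kv then pvAnyStep (o.map pvPi) kv else o.map pvPi) =
      (pvStep pvK1 pvK2 p o kv).map pvPi := by
  cases o with
  | none => by_cases hp : p kv = true <;> simp [pvStep, pvAnyStep, hp]
  | some b =>
    by_cases hp : p kv = true
    · have hmap : (pvStep pvK1 pvK2 p (some b) kv).map pvPi =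
          if pvLtB pvK1 pvK2 b kv = true then some (pvPi kv) else some (pvPi b) := by
        by_cases hlt : pvLtB pvK1 pvK2 b kv = true <;> simp [pvStep, hp, hlt]
      rw [hmap, if_pos hp]
      show (if (pvPi b).1.1 < pvK1 kv ∨ ((pvPi b).1.1 = pvK1 kv ∧ (pvPi b).1.2 < pvK2 kv)
            then some (pvPi kv) else some (pvPi b)) = _
      by_cases hlt : pvLtB pvK1 pvK2 b kv = true
      · have hc : (pvPi b).1.1 < pvK1 kv ∨ ((pvPi b).1.1 = pvK1 kv ∧ (pvPi b).1.2 < pvK2 kv) :=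
          (pvLtB_iff pvK1 pvK2 b kv).mp hlt
        rw [if_pos hc, if_pos hlt]
      · have hc : ¬((pvPi b).1.1 < pvK1 kv ∨ ((pvPi b).1.1 = pvK1 kv ∧ (pvPi b).1.2 < pvK2 kv)) :=
          fun hco => hlt ((pvLtB_iff pvK1 pvK2 b kv).mpr hco)
        rw [if_neg hc, if_neg hlt]
    · rw [Bool.not_eq_true] at hp
      simp [pvStep, hp]

theorem foldl_anyStep_map_pi (p : (String × List (String × String)) → Bool)
    (l : List (String × List (String × String))) :
    ∀ (o : Option (String × List (String × String))),
    l.foldl (fun st kv => if p kv then pvAnyStep st kv else st) (o.map pvPi) =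
      (l.foldl (pvStep pvK1 pvK2 p) o).map pvPi := by
  induction l with
  | nil => intro o; simp
  | cons kv l ih =>
    intro o
    simp only [List.foldl_cons]
    rw [anyStep_map_pi p o kv]
    exact ih (pvStep pvK1 pvK2 p o kv)

def pvItemStep (st : Option ((String × String) × String) × Option ((String × String) × String))
    (kv : String × List (String × String)) :
    Option ((String × String) × String) × Option ((String × String) × String) :=
  match pvG0 kv with
  | some r => pvBodyRow st r
  | none => st

theorem foldl_itemStep (l : List (String × List (String × String))) :
    ∀ (init : Option ((String × String) × String) × Option ((String × String) × String)),
    l.foldl pvItemStep init = (l.filterMap pvG0).foldl pvBodyRow init := by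
  induction l with
  | nil => intro init; simp
  | cons kv l ih =>
    intro init
    cases hg : pvG0 kv <;> simp [List.foldl_cons, pvItemStep, hg, ih]

-- B's loop, restated over the filtered row list
theorem pvLoopB_eq (td : PySem.Dict String (List (String × String))) :
    pvLoopB td =
      ((pvRowsA td).foldl (pvStep pvK1 pvK2 (fun _ => true)) none |>.map pvPi,
       (pvRowsA td).foldl (pvStep pvK1 pvK2 (fun kv => pvIsActive kv.2)) none |>.map pvPi) := by
  unfold pvLoopB
  have hbody : (fun (st : Option ((String × String) × String) × Option ((String × String) × String)) kv =>
      let rid := PySem.Str.strip kv.1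
      if rid = "" then st
      else
        let key := (pvTaskGet kv.2 "updated_at", pvTaskGet kv.2 "created_at")
        let gt := fun (b : (String × String) × String) =>
          b.1.1 < key.1 ∨ (b.1.1 = key.1 ∧ b.1.2 < key.2)
        let bAny := match st.1 with
          | none => some (key, rid)
          | some b => if gt b then some (key, rid) else st.1
        let bAct := if pvIsActive kv.2 then
            match st.2 with
            | none => some (key, rid)
            | some b => if gt b then some (key, rid) else st.2
          else st.2
        (bAny, bAct)) =
      pvItemStep := by
    funext st kv
    by_cases h : PySem.Str.strip kv.1 = ""
    · simp [pvItemStep, pvG0, h]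
    · cases hs1 : st.1 with
      | none => cases hs2 : st.2 with
        | none => simp [pvItemStep, pvG0, h, pvBodyRow, pvAnyStep, pvActStep, pvPi, pvK1, pvK2, hs1, hs2]
        | some b => simp [pvItemStep, pvG0, h, pvBodyRow, pvAnyStep, pvActStep, pvPi, pvK1, pvK2, hs1, hs2]
      | some b => cases hs2 : st.2 with
        | none => simp [pvItemStep, pvG0, h, pvBodyRow, pvAnyStep, pvActStep, pvPi, pvK1, pvK2, hs1, hs2]
        | some b2 => simp [pvItemStep, pvG0, h, pvBodyRow, pvAnyStep, pvActStep, pvPi, pvK1, pvK2, hs1, hs2]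
  rw [hbody, foldl_itemStep, ← pvRowsA_eq]
  have hsplit : (pvRowsA td).foldl pvBodyRow (none, none) =
      ((pvRowsA td).foldl pvAnyStep none, (pvRowsA td).foldl pvActStep none) := by
    have hb : pvBodyRow = fun (s : Option ((String × String) × String) × Option ((String × String) × String)) e => (pvAnyStep s.1 e, pvActStep s.2 e) := rfl
    rw [hb]
    exact PySem.List.foldl_prod_mk pvAnyStep pvActStep (pvRowsA td) none none
  rw [hsplit]
  have h1 : (pvRowsA td).foldl pvAnyStep none =
      ((pvRowsA td).foldl (pvStep pvK1 pvK2 (fun _ => true)) none).map pvPi := by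
    have := foldl_anyStep_map_pi (fun _ => true) (pvRowsA td) none
    simpa using this
  have h2 : (pvRowsA td).foldl pvActStep none =
      ((pvRowsA td).foldl (pvStep pvK1 pvK2 (fun kv => pvIsActive kv.2)) none).map pvPi := by
    have := foldl_anyStep_map_pi (fun kv => pvIsActive kv.2) (pvRowsA td) none
    have he : (fun st kv => if pvIsActive kv.2 then pvAnyStep st kv else st) = pvActStep := by
      funext st kv; simp [pvActStep]
    rw [he] at this
    simpa using this
  rw [h1, h2]

theorem pvAfter_eq (td : PySem.Dict String (List (String × String))) :
    pvAfterA td = pvAfterB td := by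
  have h1 : pvSortedTasksA td = PySem.List.sorted2 (pvRowsA td) pvK1 pvK2 true := rfl
  unfold pvAfterA pvAfterB
  rw [pvLoopB_eq, h1]
  rw [find?_sorted2]
  cases hact : (pvRowsA td).foldl (pvStep pvK1 pvK2 (fun kv => pvIsActive kv.2)) none with
  | some kv => simp [hact, pvPi]
  | none =>
    have hh := find?_sorted2 pvK1 pvK2 (fun _ => true) (pvRowsA td)
    rw [find?_true_eq_head?] at hh
    cases hsrt : PySem.List.sorted2 (pvRowsA td) pvK1 pvK2 true with
    | nil =>
      rw [hsrt] at hh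
      simp only [List.head?_nil] at hh
      simp [hact, hsrt, ← hh]
    | cons kv t =>
      rw [hsrt] at hh
      simp only [List.head?_cons] at hh
      simp [hact, hsrt, ← hh, pvPi]

-- ===== VERDICT (by name: the statement is the Claim_ definition above) =====
theorem pick_active_request_id_py_spec : Claim_equal_pick_active_request_id_py := by
  intro entry tasks _
  unfold Spec_pick_active_request_id_py pick_active_request_id_py pick_active_request_id_py_alt
  simp only [pvAfter_eq]
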